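-- pv_equiv track=rewrite | github.com/Klimchuk-sergei/bank-operations-widget | src/description.py | count_operations_by_categories
-- ===== SOURCE A (Python) =====
-- from collections import defaultdict
--
-- def count_operations_by_categories(operations, categories):
--     """
--     Счетчик количества операций каждой категории.
--
--     Принимает:
--         operations: Список словарей с данными о банковских операциях.
--                    Каждый словарь должен содержать ключ 'description'.
--         categories: Список строк с названиями категорий для подсчёта.
--
--     Возвращает:
--         Словарь, в котором ключи - названия категорий, значения - количество операций.
--         Если категория нет, она будет равна 0.
--     """
--     category_counts = defaultdict(int)
--
--     # Инициализируем все категории с нулевым счётчиком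
--     for category in categories:
--         category_counts[category] = 0
--
--     # Подсчитываем операции
--     for operation in operations:
--         if 'description' not in operation:
--             continue
--
--         description = operation['description'].lower()
--         for category in categories:
--             if category.lower() in description:
--                 category_counts[category] += 1
--                 break  # Операция относится только к одной категории
--
--     return dict(category_counts)
-- ===== SOURCE B (Python) =====
-- def count_operations_by_categories(operations, categories):
--     # Staged sieve: instead of scanning the category list for every operation,
--     # loop over categories once; each category claims (and removes) every
--     # still-unclaimed description it matches, so earlier categories win ties.
--     remaining = [op['description'].lower() for op in operations if 'description' in op]
--     counts = {c: 0 for c in categories}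
--     for c in categories:
--         lc = c.lower()
--         counts[c] += len([d for d in remaining if lc in d])
--         remaining = [d for d in remaining if lc not in d]
--     return counts
-- ===== Notes on version B (the rewrite author's own statement) =====
-- stated objective: alternative
-- what changed: B transposes the loops into a staged sieve: it lowercases all descriptions once, then iterates over the categories, each category counting and removing every still-unclaimed matching description, instead of A's per-operation scan of the category list with a break at the first match.
import Mathlib
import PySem

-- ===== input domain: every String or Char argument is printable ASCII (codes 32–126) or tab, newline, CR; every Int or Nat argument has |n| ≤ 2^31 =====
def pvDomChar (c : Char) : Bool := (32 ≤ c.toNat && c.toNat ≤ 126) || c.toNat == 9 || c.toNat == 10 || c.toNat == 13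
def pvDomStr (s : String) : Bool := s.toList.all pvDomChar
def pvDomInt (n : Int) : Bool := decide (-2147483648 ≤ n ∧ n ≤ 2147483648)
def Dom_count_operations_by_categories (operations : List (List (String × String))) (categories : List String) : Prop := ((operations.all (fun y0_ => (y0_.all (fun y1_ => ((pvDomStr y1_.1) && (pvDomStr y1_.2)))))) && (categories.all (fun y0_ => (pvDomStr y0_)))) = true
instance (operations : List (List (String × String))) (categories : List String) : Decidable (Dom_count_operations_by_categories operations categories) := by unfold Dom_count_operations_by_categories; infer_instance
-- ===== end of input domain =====

-- B replaces A's per-operation scan over the categories by a staged sieve: lowercase all descriptions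
-- once, then each category in turn counts and removes every still-unclaimed matching description
-- (objective: alternative; same asymptotic cost).

-- ===== PORT A =====
-- inner 'for category in categories: if category.lower() in description: counts[category] += 1; break'
def pvAInner (d : PySem.Dict String Int) (desc : String) : List String → PySem.Dict String Int
  | [] => d
  | c :: cs =>
    if PySem.Str.isIn (PySem.Str.lower c) desc then d.modify c 0 (· + 1)
    else pvAInner d desc cs

def count_operations_by_categories (operations : List (List (String × String))) (categories : List String) : List (String × Int) :=
  -- category_counts = defaultdict(int); for category in categories: category_counts[category] = 0
  let d0 : PySem.Dict String Int := categories.foldl (fun d c => d.insert c 0) PySem.Dict.empty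
  -- for operation in operations: …
  let d := operations.foldl (fun d op =>
    match (PySem.Dict.mk op).get? "description" with
    | none => d            -- 'description' not in operation: continue
    | some descRaw => pvAInner d (PySem.Str.lower descRaw) categories) d0
  d.items                  -- dict(category_counts)

-- ===== PORT B =====
def count_operations_by_categories_alt (operations : List (List (String × String))) (categories : List String) : List (String × Int) :=
  -- remaining = [op['description'].lower() for op in operations if 'description' in op]
  let remaining0 := operations.filterMap (fun op => ((PySem.Dict.mk op).get? "description").map PySem.Str.lower)
  -- counts = {c: 0 for c in categories}
  let counts0 : PySem.Dict String Int := categories.foldl (fun d c => d.insert c 0) PySem.Dict.empty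
  -- for c in categories: lc = c.lower(); counts[c] += len([d for d in remaining if lc in d]);
  --                      remaining = [d for d in remaining if lc not in d]
  let st := categories.foldl (fun (st : PySem.Dict String Int × List String) c =>
      (st.1.modify c 0 (· + ((st.2.filter (fun d => PySem.Str.isIn (PySem.Str.lower c) d)).length : Int)),
       st.2.filter (fun d => !PySem.Str.isIn (PySem.Str.lower c) d))) (counts0, remaining0)
  st.1.items

-- ===== PRECONDITION & SPEC =====
def Spec_count_operations_by_categories (operations : List (List (String × String))) (categories : List String) (out : List (String × Int)) : Prop := out = count_operations_by_categories_alt operations categories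
instance (operations : List (List (String × String))) (categories : List String) (out : List (String × Int)) : Decidable (Spec_count_operations_by_categories operations categories out) := by unfold Spec_count_operations_by_categories; infer_instance

-- ===== CLAIM (what is proved, stated in full; the proofs are below) =====
def Claim_equal_count_operations_by_categories : Prop := ∀ (operations : List (List (String × String))) (categories : List String), Dom_count_operations_by_categories operations categories → Spec_count_operations_by_categories operations categories (count_operations_by_categories operations categories)

-- ===== LEMMAS AND PROOFS =====

-- first category (in list order) whose lowercase is contained in the (already lowered) description
def pvFM : List String → String → Option String
  | [], _ => none
  | c :: cs, d => if PySem.Str.isIn (PySem.Str.lower c) d then some c else pvFM cs d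

-- the lowered descriptions of the operations that have one
def pvDescs (operations : List (List (String × String))) : List String :=
  operations.filterMap (fun op => ((PySem.Dict.mk op).get? "description").map PySem.Str.lower)

-- the first-matched category of each description
def pvHits (operations : List (List (String × String))) (categories : List String) : List String :=
  (pvDescs operations).filterMap (pvFM categories)

lemma pvFM_mem {cats : List String} {d c : String} (h : pvFM cats d = some c) : c ∈ cats := by
  induction cats with
  | nil => simp [pvFM] at h
  | cons x xs ih =>
    simp only [pvFM] at h
    split at h
    · cases h; exact List.mem_cons_self
    · exact List.mem_cons_of_mem _ (ih h)

-- A's inner loop is exactly "modify the first match, if any"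
lemma pvAInner_eq (d : PySem.Dict String Int) (dl : String) (cats : List String) :
    pvAInner d dl cats =
      match pvFM cats dl with
      | none => d
      | some c => d.modify c 0 (· + 1) := by
  induction cats with
  | nil => simp [pvAInner, pvFM]
  | cons x xs ih =>
    simp only [pvAInner, pvFM]
    split_ifs with h
    · rfl
    · simpa using ih

-- a fold that skips 'none' steps is a fold over the filterMap
lemma foldl_filterMap_option {α β γ : Type} (g : α → Option β) (f : γ → β → γ)
    (l : List α) (x : γ) :
    l.foldl (fun acc a => match g a with | none => acc | some b => f acc b) x
      = (l.filterMap g).foldl f x := by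
  induction l generalizing x with
  | nil => rfl
  | cons a l ih =>
    simp only [List.foldl_cons, List.filterMap_cons]
    cases g a <;> simp [ih]

-- zero-initialisation: every default-0 lookup stays 0
lemma getD_foldl_insert_zero (cats : List String) (d : PySem.Dict String Int) (k : String)
    (h : d.getD k 0 = 0) :
    (cats.foldl (fun d c => d.insert c 0) d).getD k 0 = 0 := by
  induction cats generalizing d with
  | nil => exact h
  | cons c cs ih =>
    simp only [List.foldl_cons]
    exact ih _ (by rw [PySem.Dict.getD_insert]; split <;> simp [h])

-- updating a set with elements it already has changes nothing
lemma update_eq_self_of_subset (s : List String) (xs : List String)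
    (h : ∀ x ∈ xs, x ∈ s) : PySem.Set.update s xs = s := by
  rw [PySem.Set.update_eq_append_filter]
  have : (PySem.Set.ofList xs).filter (fun y => !(PySem.Set.contains s y)) = [] := by
    apply List.filter_eq_nil_iff.mpr
    intro y hy
    have hys := h y ((PySem.Set.mem_ofList _ _).mp hy)
    simp [PySem.Set.contains, hys]
  rw [this, List.append_nil]

-- splitting the first-match count at the head category
lemma pvFM_cons (c : String) (cs : List String) (d : String) :
    pvFM (c :: cs) d = if PySem.Str.isIn (PySem.Str.lower c) d then some c else pvFM cs d := rfl

lemma count_filterMap_fm (c : String) (cs : List String) (ds : List String) (k : String) :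
    (ds.filterMap (pvFM (c :: cs))).count k
      = (if k = c then (ds.filter (fun d => PySem.Str.isIn (PySem.Str.lower c) d)).length else 0)
        + ((ds.filter (fun d => !PySem.Str.isIn (PySem.Str.lower c) d)).filterMap (pvFM cs)).count k := by
  induction ds with
  | nil => simp
  | cons d ds ih =>
    simp only [List.filterMap_cons, List.filter_cons, pvFM_cons] at ih ⊢
    cases hm : PySem.Str.isIn (PySem.Str.lower c) d with
    | true =>
      simp only [Bool.not_true, Bool.false_eq_true, reduceIte, List.count_cons,
        List.length_cons, beq_iff_eq, ih]
      split_ifs with h1 h2 h3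
      · omega
      · exact absurd (Eq.symm h1) h2
      · exact absurd (Eq.symm h3) h1
      · omega
    | false =>
      simp only [Bool.not_false, Bool.false_eq_true, reduceIte]
      cases hfm : pvFM cs d with
      | none => simp only [List.filterMap_cons, hfm]; exact ih
      | some c' =>
        simp only [List.filterMap_cons, hfm, List.count_cons, beq_iff_eq, ih]
        split_ifs <;> first | omega | simp_all

-- B's staged fold: the counts component, as a first-match count
lemma B_fold_getD (cats : List String) (ds : List String) (d0 : PySem.Dict String Int) (k : String) :
    ((cats.foldl (fun (st : PySem.Dict String Int × List String) c =>
        (st.1.modify c 0 (· + ((st.2.filter (fun d => PySem.Str.isIn (PySem.Str.lower c) d)).length : Int)),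
         st.2.filter (fun d => !PySem.Str.isIn (PySem.Str.lower c) d))) (d0, ds)).1).getD k 0
      = d0.getD k 0 + ((ds.filterMap (pvFM cats)).count k : Int) := by
  induction cats generalizing ds d0 with
  | nil => simp [pvFM]
  | cons c cs ih =>
    simp only [List.foldl_cons]
    rw [ih, PySem.Dict.getD_modify, count_filterMap_fm]
    by_cases hk : k = c <;> simp [hk, add_assoc]

-- B's staged fold: the keys component
lemma B_fold_keys (cats : List String) (ds : List String) (d0 : PySem.Dict String Int) :
    ((cats.foldl (fun (st : PySem.Dict String Int × List String) c =>
        (st.1.modify c 0 (· + ((st.2.filter (fun d => PySem.Str.isIn (PySem.Str.lower c) d)).length : Int)),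
         st.2.filter (fun d => !PySem.Str.isIn (PySem.Str.lower c) d))) (d0, ds)).1).keys
      = PySem.Set.update d0.keys cats := by
  induction cats generalizing ds d0 with
  | nil => simp [PySem.Set.update]
  | cons c cs ih =>
    simp only [List.foldl_cons]
    rw [ih, PySem.Dict.keys_modify]
    have h1 : (d0.insert c (d0.getD c 0 + ((ds.filter (fun d => PySem.Str.isIn (PySem.Str.lower c) d)).length : Int))).keys
        = PySem.Set.update d0.keys [c] := by
      simpa using PySem.Dict.keys_foldl_insert [c]
        (fun d (x : String) => d0.getD c 0 + ((ds.filter (fun d => PySem.Str.isIn (PySem.Str.lower c) d)).length : Int)) d0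
    rw [h1, PySem.Set.update_cons, PySem.Set.update_nil, ← PySem.Set.update_cons]

-- ===== VERDICT (by name: the statement is the Claim_ definition above) =====
theorem count_operations_by_categories_spec : Claim_equal_count_operations_by_categories := by
  intro ops cats _
  show _ = _
  unfold count_operations_by_categories count_operations_by_categories_alt
  simp only []
  -- A's operation loop as a modify-fold over pvHits
  have hA : (ops.foldl (fun d op =>
      match (PySem.Dict.mk op).get? "description" with
      | none => d
      | some descRaw => pvAInner d (PySem.Str.lower descRaw) cats)
      (cats.foldl (fun d c => d.insert c 0) PySem.Dict.empty))
      = (pvHits ops cats).foldl (fun d c => d.modify c 0 (· + 1))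
          (cats.foldl (fun d c => d.insert c 0) PySem.Dict.empty) := by
    have h1 : (ops.foldl (fun d op =>
        match (PySem.Dict.mk op).get? "description" with
        | none => d
        | some descRaw => pvAInner d (PySem.Str.lower descRaw) cats)
        (cats.foldl (fun d c => d.insert c 0) PySem.Dict.empty))
        = (pvDescs ops).foldl (fun d dl => pvAInner d dl cats)
            (cats.foldl (fun d c => d.insert c 0) PySem.Dict.empty) := by
      rw [pvDescs, ← foldl_filterMap_option]
      apply PySem.List.foldl_congr_mem
      intro d op _
      cases hdo : (PySem.Dict.mk op).get? "description"
      · simp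
      · simp
    rw [h1, pvHits, ← foldl_filterMap_option]
    apply PySem.List.foldl_congr_mem
    intro d dl _
    rw [pvAInner_eq]
    cases pvFM cats dl <;> rfl
  rw [hA]
  set zi := cats.foldl (fun d c => d.insert c 0) (PySem.Dict.empty : PySem.Dict String Int) with hzi
  have hmem : ∀ x ∈ pvHits ops cats, x ∈ cats := by
    intro x hx
    obtain ⟨d, _, hfm⟩ := List.mem_filterMap.mp hx
    exact pvFM_mem hfm
  have hzikeys : zi.keys = PySem.Set.ofList cats := by
    rw [hzi, PySem.Dict.keys_foldl_insert]
    simp only [PySem.Dict.keys_empty]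
    exact PySem.Set.update_nil_left _
  -- keys of both result dicts: the distinct categories, in order
  have hkA : ((pvHits ops cats).foldl (fun d c => d.modify c 0 (· + 1)) zi).keys
      = PySem.Set.ofList cats := by
    rw [PySem.Dict.keys_foldl_modify, hzikeys]
    exact update_eq_self_of_subset _ _ (fun x hx => (PySem.Set.mem_ofList _ _).mpr (hmem x hx))
  have hkB : ((cats.foldl (fun (st : PySem.Dict String Int × List String) c =>
        (st.1.modify c 0 (· + ((st.2.filter (fun d => PySem.Str.isIn (PySem.Str.lower c) d)).length : Int)),
         st.2.filter (fun d => !PySem.Str.isIn (PySem.Str.lower c) d))) (zi, pvDescs ops)).1).keys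
      = PySem.Set.ofList cats := by
    rw [B_fold_keys, hzikeys]
    exact update_eq_self_of_subset _ _ (fun x hx => (PySem.Set.mem_ofList _ _).mpr hx)
  have hndA := hkA ▸ PySem.Set.nodup_ofList cats
  have hndB := hkB ▸ PySem.Set.nodup_ofList cats
  refine Eq.trans (PySem.Dict.items_eq_map_keys _ hndA 0) ?_
  refine Eq.trans ?_ (PySem.Dict.items_eq_map_keys _ hndB 0).symm
  rw [hkA, hkB]
  apply List.map_congr_left
  intro k hk
  have hkcats : k ∈ cats := (PySem.Set.mem_ofList _ _).mp hk
  have hz : zi.getD k 0 = 0 :=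
    getD_foldl_insert_zero cats PySem.Dict.empty k (by simp [PySem.Dict.getD_empty])
  rw [PySem.Dict.getD_foldl_modify_add_one, B_fold_getD, hz, pvHits]
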